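-- pv_equiv track=rewrite | github.com/angkul07/egodex_retargeting | notebooks/06_stage3_animate.py | egodex_bones
-- ===== SOURCE A (Python) =====
-- def egodex_bones(side: str) -> list[tuple[str, str, str]]:
--     """Parent-child joint pairs + the finger they belong to (for coloring)."""
--     bones: list[tuple[str, str, str]] = []
--     # Thumb chain
--     thumb_chain = ["ThumbKnuckle", "ThumbIntermediateBase", "ThumbIntermediateTip", "ThumbTip"]
--     bones.append((f"{side}Hand", f"{side}{thumb_chain[0]}", "thumb"))
--     for a, b in zip(thumb_chain, thumb_chain[1:]):
--         bones.append((f"{side}{a}", f"{side}{b}", "thumb"))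
--     # 4 long fingers
--     finger_color_map = {
--         "IndexFinger": "index",
--         "MiddleFinger": "middle",
--         "RingFinger": "ring",
--         "LittleFinger": "pinky",
--     }
--     for finger, color in finger_color_map.items():
--         chain = [
--             f"{finger}Metacarpal",
--             f"{finger}Knuckle",
--             f"{finger}IntermediateBase",
--             f"{finger}IntermediateTip",
--             f"{finger}Tip",
--         ]
--         bones.append((f"{side}Hand", f"{side}{chain[0]}", color))
--         for a, b in zip(chain, chain[1:]):
--             bones.append((f"{side}{a}", f"{side}{b}", color))
--     return bones
-- ===== SOURCE B (Python) =====
-- def egodex_bones(side: str) -> list[tuple[str, str, str]]: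
--     """Parent-child joint pairs + the finger they belong to (for coloring)."""
--     SEGMENTS = ["Metacarpal", "Knuckle", "IntermediateBase", "IntermediateTip", "Tip"]
--     FINGERS = [("Thumb", "thumb"), ("IndexFinger", "index"), ("MiddleFinger", "middle"),
--                ("RingFinger", "ring"), ("LittleFinger", "pinky")]
--
--     def descend(parent, joints, color):
--         # recursively walk down the finger, threading the current parent joint
--         if not joints:
--             return []
--         child = side + joints[0]
--         return [(parent, child, color)] + descend(child, joints[1:], color)
--
--     out: list[tuple[str, str, str]] = []
--     for finger, color in FINGERS:
--         segs = SEGMENTS[1:] if finger == "Thumb" else SEGMENTS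
--         out += descend(side + "Hand", [finger + s for s in segs], color)
--     return out
-- ===== Notes on version B (the rewrite author's own statement) =====
-- stated objective: alternative
-- what changed: Replaces per-chain list construction plus pairwise zip/root-edge appends with a uniform segment table (thumb = the same table minus Metacarpal) and a recursive descent that threads the current parent joint down each finger, so no chain list, no zip and no separate root edge exist.
import Mathlib
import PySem

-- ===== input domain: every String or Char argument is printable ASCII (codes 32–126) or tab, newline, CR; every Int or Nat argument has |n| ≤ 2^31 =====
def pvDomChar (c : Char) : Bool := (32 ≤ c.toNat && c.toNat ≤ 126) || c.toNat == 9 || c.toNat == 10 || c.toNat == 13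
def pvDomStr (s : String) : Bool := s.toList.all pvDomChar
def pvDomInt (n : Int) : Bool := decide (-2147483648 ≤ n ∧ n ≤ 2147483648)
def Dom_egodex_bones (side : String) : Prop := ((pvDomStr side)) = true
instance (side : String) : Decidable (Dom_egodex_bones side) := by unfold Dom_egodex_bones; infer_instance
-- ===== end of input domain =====

-- B replaces chain lists + pairwise zip + separate root-edge appends by a uniform segment
-- table and a recursive descent threading the parent joint (alternative decomposition).


-- ===== PORT A =====
-- Literal transliteration of A: thumb handled specially, then dict of fingers,
-- each finger building its chain and appending the root edge before the zipped edges.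
def egodex_bones (side : String) : List (String × String × String) :=
  let thumb_chain : List String := ["ThumbKnuckle", "ThumbIntermediateBase", "ThumbIntermediateTip", "ThumbTip"]
  let bones : List (String × String × String) :=
    [(side ++ "Hand", side ++ ((PySem.List.pyGet? thumb_chain 0).getD ""), "thumb")]
  let bones := (thumb_chain.zip thumb_chain.tail).foldl
    (fun bs ab => bs ++ [(side ++ ab.1, side ++ ab.2, "thumb")]) bones
  let finger_color_map : List (String × String) :=
    [("IndexFinger", "index"), ("MiddleFinger", "middle"), ("RingFinger", "ring"), ("LittleFinger", "pinky")]
  finger_color_map.foldl (fun bs fc =>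
    let finger := fc.1
    let color := fc.2
    let chain : List String :=
      [finger ++ "Metacarpal", finger ++ "Knuckle", finger ++ "IntermediateBase",
       finger ++ "IntermediateTip", finger ++ "Tip"]
    let bs := bs ++ [(side ++ "Hand", side ++ ((PySem.List.pyGet? chain 0).getD ""), color)]
    (chain.zip chain.tail).foldl
      (fun bs2 ab => bs2 ++ [(side ++ ab.1, side ++ ab.2, color)]) bs) bones

-- ===== PORT B =====
-- B's recursive descent: walk down the finger, threading the current parent joint.
def pvDescend (side parent : String) (joints : List String) (color : String) :
    List (String × String × String) :=
  match joints with
  | [] => []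
  | j :: rest => (parent, side ++ j, color) :: pvDescend side (side ++ j) rest color

def egodex_bones_alt (side : String) : List (String × String × String) :=
  let SEGMENTS : List String := ["Metacarpal", "Knuckle", "IntermediateBase", "IntermediateTip", "Tip"]
  let FINGERS : List (String × String) :=
    [("Thumb", "thumb"), ("IndexFinger", "index"), ("MiddleFinger", "middle"),
     ("RingFinger", "ring"), ("LittleFinger", "pinky")]
  FINGERS.foldl (fun out fc =>
    let segs := if fc.1 == "Thumb" then SEGMENTS.drop 1 else SEGMENTS
    out ++ pvDescend side (side ++ "Hand") (segs.map (fun s => fc.1 ++ s)) fc.2) []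

-- ===== PRECONDITION & SPEC =====
def Spec_egodex_bones (side : String) (out : List (String × String × String)) : Prop := out = egodex_bones_alt side
instance (side : String) (out : List (String × String × String)) : Decidable (Spec_egodex_bones side out) := by unfold Spec_egodex_bones; infer_instance

-- ===== CLAIM (what is proved, stated in full; the proofs are below) =====
def Claim_equal_egodex_bones : Prop := ∀ (side : String), Dom_egodex_bones side → Spec_egodex_bones side (egodex_bones side)

-- ===== LEMMAS AND PROOFS =====

-- ===== VERDICT (by name: the statement is the Claim_ definition above) =====
theorem egodex_bones_spec : Claim_equal_egodex_bones := by
  intro side _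
  unfold Spec_egodex_bones egodex_bones egodex_bones_alt
  simp [PySem.List.pyGet?, PySem.List.pyIdx?, List.zip, List.zipWith, List.foldl,
        List.map, pvDescend]
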